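-- pv_equiv track=rewrite | github.com/mortyc126-debug/rayon | src/formal_subtree_bound.py | count_nonequivalent_partial_graphs
-- ===== SOURCE A (Python) =====
-- import itertools
--
-- def count_nonequivalent_partial_graphs(N, k, t_edges):
--     """Count the number of non-equivalent partial graphs after
--     querying t_edges edge variables for k-CLIQUE on N vertices.
--
--     Two partial graphs P₁, P₂ (each assigning t_edges to {0,1})
--     are equivalent iff:
--       for ALL completions G: CLIQUE(P₁∪G) = CLIQUE(P₂∪G)
--
--     Returns: number of equivalence classes.
--
--     Method: enumerate all 2^t partial assignments, group by equivalence.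
--     (Feasible only for small t.)
--     """
--     n = N * (N-1) // 2
--     edge_list = []
--     edge_idx = {}
--     idx = 0
--     for i in range(N):
--         for j in range(i+1, N):
--             edge_list.append((i, j))
--             edge_idx[(i,j)] = idx
--             edge_idx[(j,i)] = idx
--             idx += 1
--
--     # Choose which t edges to query (use first t for simplicity)
--     if t_edges > n:
--         t_edges = n
--     query_edges = list(range(t_edges))
--     remaining_edges = list(range(t_edges, n))
--     num_remaining = len(remaining_edges)
--
--     if num_remaining > 18:  # too many completions
--         return -1  # infeasible
--
--     # For each partial assignment of query_edges:
--     # Compute the "signature" = truth table of CLIQUE over all completions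
--     equivalence_classes = set()
--
--     for partial_bits in range(2**t_edges):
--         # This partial assignment: edge query_edges[j] = (partial_bits >> j) & 1
--         partial = {}
--         for j in range(t_edges):
--             partial[query_edges[j]] = (partial_bits >> j) & 1
--
--         # Signature: for each completion, does k-CLIQUE hold?
--         sig = []
--         for comp_bits in range(2**num_remaining):
--             # Full assignment
--             full = [0] * n
--             for j in range(t_edges):
--                 full[query_edges[j]] = partial[query_edges[j]]
--             for j in range(num_remaining):
--                 full[remaining_edges[j]] = (comp_bits >> j) & 1
--
--             # Check k-CLIQUE
--             has_clique = False
--             for combo in itertools.combinations(range(N), k):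
--                 clique = True
--                 for a in range(len(combo)):
--                     for b in range(a+1, len(combo)):
--                         if not full[edge_idx[(combo[a], combo[b])]]:
--                             clique = False
--                             break
--                     if not clique:
--                         break
--                 if clique:
--                     has_clique = True
--                     break
--             sig.append(1 if has_clique else 0)
--
--         equivalence_classes.add(tuple(sig))
--
--     return len(equivalence_classes)
-- ===== SOURCE B (Python) =====
-- import itertools
--
-- def count_nonequivalent_partial_graphs(N, k, t_edges):
--     """Table-first re-implementation: precompute one clique mask per k-subset and a
--     truth table CLIQUE(g) for every full graph g, then read each signature off the
--     table by bit-composing partial_bits with the completion bits."""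
--     n = N * (N - 1) // 2
--     t = min(t_edges, n)
--     num_remaining = n - t
--     if num_remaining > 18:
--         return -1  # infeasible
--
--     # edges in the same canonical order (row-major over i < j); bit idx of edge = position
--     edges = [(i, j) for i in range(N) for j in range(i + 1, N)]
--
--     # one bitmask per candidate clique: the edges both of whose endpoints lie in the combo
--     combo_masks = []
--     for combo in itertools.combinations(range(N), k):
--         members = set(combo)
--         m = 0
--         for idx, (i, j) in enumerate(edges):
--             if i in members and j in members:
--                 m |= 1 << idx
--         combo_masks.append(m)
--
--     # truth table over all 2^n full graphs
--     clique_table = [1 if any(g & m == m for m in combo_masks) else 0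
--                     for g in range(1 << n)]
--
--     sigs = set()
--     for partial_bits in range(1 << t):
--         sigs.add(tuple(clique_table[partial_bits | (comp_bits << t)]
--                        for comp_bits in range(1 << num_remaining)))
--     return len(sigs)
-- ===== Notes on version B (the rewrite author's own statement) =====
-- stated objective: faster
-- what changed: B replaces A's per-(partial,completion) rebuild of the edge vector, dict-based edge lookups and nested pairwise clique scan by precomputing one edge-bitmask per k-subset and a CLIQUE truth table over all 2^n full graphs read off by bit-composition, and it decides the infeasibility guard arithmetically before building any Theta(N^2) edge structures (A builds the full edge list and dict even when it then returns -1).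
-- outside the precondition, e.g. on count_nonequivalent_partial_graphs(3, 2, -1): A raises TypeError, B raises ValueError; on count_nonequivalent_partial_graphs(3, -1, 2): A raises ValueError, B raises ValueError
import Mathlib
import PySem

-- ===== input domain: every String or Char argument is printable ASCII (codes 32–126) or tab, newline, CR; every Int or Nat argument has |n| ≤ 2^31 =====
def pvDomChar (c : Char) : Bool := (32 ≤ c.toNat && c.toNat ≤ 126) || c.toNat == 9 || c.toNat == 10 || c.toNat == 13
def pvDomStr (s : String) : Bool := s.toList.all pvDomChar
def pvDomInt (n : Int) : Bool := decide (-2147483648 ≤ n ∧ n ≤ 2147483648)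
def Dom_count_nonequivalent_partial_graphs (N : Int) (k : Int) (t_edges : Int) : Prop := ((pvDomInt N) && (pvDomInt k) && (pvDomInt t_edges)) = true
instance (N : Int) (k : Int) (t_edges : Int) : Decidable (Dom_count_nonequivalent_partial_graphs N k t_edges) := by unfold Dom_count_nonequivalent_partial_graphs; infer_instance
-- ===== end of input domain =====

-- B precomputes one edge-bitmask per k-subset and a CLIQUE truth table over all full
-- graphs, then reads each signature off the table by bit-composition, instead of A's
-- per-completion rebuild of the edge vector and nested pairwise scan; B also decides the
-- infeasibility guard before building any edge structures (objective: faster, as measured).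

-- ===== PORT A =====
-- Literal port of A. Under Pre_ every loop counter / bit value is a nonnegative int
-- (t_edges ≥ 0 and k ≥ 0 in the non-guard branch, n = N*(N-1)//2 ≥ 0 always), so the
-- counters are carried as Nat; `range(a, b)` is `List.range' a (b - a)`.
-- The edge_list/edge_idx/idx build is pure and unused when the infeasibility guard
-- fires, so the port places it after the guard (observationally identical).
def count_nonequivalent_partial_graphs (N : Int) (k : Int) (t_edges : Int) : Int :=
  let n : Int := PySem.Int.floordiv (N * (N - 1)) 2
  -- if t_edges > n: t_edges = n
  let t : Int := if t_edges > n then n else t_edges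
  -- num_remaining = len(range(t_edges, n))
  let num_remaining : Int := ((n - t).toNat : Int)
  if num_remaining > 18 then -1
  else
    let NN : Nat := N.toNat   -- range(N) = List.range NN (empty for N < 0, as in Python)
    let nn : Nat := n.toNat
    let tt : Nat := t.toNat
    let rr : Nat := (n - t).toNat
    -- one nested loop carrying (edge_list, edge_idx, idx)
    let st :=
      (List.range NN).foldl (fun st i =>
        (List.range' (i+1) (NN - (i+1))).foldl
          (fun (st : List (Nat × Nat) × PySem.Dict (Nat × Nat) Nat × Nat) j =>
            (st.1 ++ [(i, j)], (st.2.1.insert (i, j) st.2.2).insert (j, i) st.2.2, st.2.2 + 1))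
          st)
        ([], PySem.Dict.empty, 0)
    let edgeIdx : PySem.Dict (Nat × Nat) Nat := st.2.1
    let query_edges : List Nat := List.range tt
    let remaining_edges : List Nat := List.range' tt rr
    let classes : PySem.Set (List Int) :=
      (List.range (2 ^ tt)).foldl (fun classes partial_bits =>
        let partialD : PySem.Dict Nat Nat :=
          (List.range tt).foldl
            (fun d j => d.insert (query_edges.getD j 0) ((partial_bits >>> j) &&& 1))
            PySem.Dict.empty
        let sig : List Int :=
          (List.range (2 ^ rr)).map (fun comp_bits =>
            let full0 : List Nat := List.replicate nn 0
            -- full[query_edges[j]] = partial[query_edges[j]]  (index/key always present)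
            let full1 := (List.range tt).foldl
              (fun f j => f.set (query_edges.getD j 0) (partialD.getD (query_edges.getD j 0) 0)) full0
            -- full[remaining_edges[j]] = (comp_bits >> j) & 1
            let full2 := (List.range rr).foldl
              (fun f j => f.set (remaining_edges.getD j 0) ((comp_bits >>> j) &&& 1)) full1
            -- nested break-loops over the pairs of the combo = Bool all / any
            let has_clique :=
              (PySem.List.combinations (List.range NN) k.toNat).any (fun combo =>
                (List.range combo.length).all (fun a =>
                  (List.range' (a+1) (combo.length - (a+1))).all (fun b =>
                    full2.getD (edgeIdx.getD (combo.getD a 0, combo.getD b 0) 0) 0 != 0)))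
            if has_clique then (1 : Int) else 0)
        classes.add sig)
        PySem.Set.empty
    PySem.Set.len classes

-- ===== PORT B =====
-- Literal port of B (Source B); same Nat-for-nonnegative-int convention as port A;
-- enumerate(edges) is edges.zipIdx (Nat counter).
def count_nonequivalent_partial_graphs_alt (N : Int) (k : Int) (t_edges : Int) : Int :=
  let n : Int := PySem.Int.floordiv (N * (N - 1)) 2
  let t : Int := min t_edges n
  let num_remaining : Int := n - t
  if num_remaining > 18 then -1
  else
    let NN : Nat := N.toNat
    let nn : Nat := n.toNat
    let tt : Nat := t.toNat
    let rr : Nat := num_remaining.toNat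
    -- edges = [(i, j) for i in range(N) for j in range(i+1, N)]
    let edges : List (Nat × Nat) :=
      (List.range NN).flatMap (fun i => (List.range' (i+1) (NN - (i+1))).map (fun j => (i, j)))
    let combo_masks : List Nat :=
      (PySem.List.combinations (List.range NN) k.toNat).map (fun combo =>
        let members : PySem.Set Nat := PySem.Set.ofList combo
        edges.zipIdx.foldl
          (fun m e => if members.contains e.1.1 && members.contains e.1.2
                      then m ||| (1 <<< e.2) else m) 0)
    let clique_table : List Int :=
      (List.range (1 <<< nn)).map (fun g =>
        if combo_masks.any (fun m => g &&& m == m) then (1 : Int) else 0)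
    let sigs : PySem.Set (List Int) :=
      (List.range (1 <<< tt)).foldl (fun s partial_bits =>
        s.add ((List.range (1 <<< rr)).map (fun comp_bits =>
          clique_table.getD (partial_bits ||| (comp_bits <<< tt)) 0)))   -- index always in range
        PySem.Set.empty
    PySem.Set.len sigs

-- ===== PRECONDITION & SPEC =====
-- Pre_ excludes only inputs on which A raises: when the infeasibility guard does not
-- fire, a negative t_edges makes range(2**t_edges) a TypeError and a negative k makes
-- itertools.combinations raise ValueError.
def Pre_count_nonequivalent_partial_graphs (N : Int) (k : Int) (t_edges : Int) : Prop :=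
  (PySem.Int.floordiv (N * (N - 1)) 2 - min t_edges (PySem.Int.floordiv (N * (N - 1)) 2) > 18)
  ∨ (0 ≤ t_edges ∧ 0 ≤ k)
instance (N : Int) (k : Int) (t_edges : Int) : Decidable (Pre_count_nonequivalent_partial_graphs N k t_edges) := by
  unfold Pre_count_nonequivalent_partial_graphs; infer_instance
def pvWitness_count_nonequivalent_partial_graphs : Int × Int × Int := (3, 2, 1)

def Spec_count_nonequivalent_partial_graphs (N : Int) (k : Int) (t_edges : Int) (out : Int) : Prop := out = count_nonequivalent_partial_graphs_alt N k t_edges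
instance (N : Int) (k : Int) (t_edges : Int) (out : Int) : Decidable (Spec_count_nonequivalent_partial_graphs N k t_edges out) := by unfold Spec_count_nonequivalent_partial_graphs; infer_instance

-- ===== CLAIM (what is proved, stated in full; the proofs are below) =====
def Claim_equal_count_nonequivalent_partial_graphs : Prop := ∀ (N : Int) (k : Int) (t_edges : Int), Dom_count_nonequivalent_partial_graphs N k t_edges → Pre_count_nonequivalent_partial_graphs N k t_edges → Spec_count_nonequivalent_partial_graphs N k t_edges (count_nonequivalent_partial_graphs N k t_edges)

-- ===== LEMMAS AND PROOFS =====
def pvStep (st : List (Nat × Nat) × PySem.Dict (Nat × Nat) Nat × Nat) (p : Nat × Nat) :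
    List (Nat × Nat) × PySem.Dict (Nat × Nat) Nat × Nat :=
  (st.1 ++ [p], (st.2.1.insert p st.2.2).insert (p.2, p.1) st.2.2, st.2.2 + 1)

def pvEdges (NN : Nat) : List (Nat × Nat) :=
  (List.range NN).flatMap (fun i => (List.range' (i+1) (NN - (i+1))).map (fun j => (i, j)))

lemma mem_pvEdges (NN x y : Nat) : (x, y) ∈ pvEdges NN ↔ x < y ∧ y < NN := by
  simp only [pvEdges, List.mem_flatMap, List.mem_map, List.mem_range, List.mem_range'_1]
  constructor
  · rintro ⟨i, hi, j, hj, he⟩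
    cases he; omega
  · rintro ⟨h1, h2⟩
    exact ⟨x, by omega, y, by omega, rfl⟩

lemma fst_lt_snd_pvEdges (NN : Nat) : ∀ p ∈ pvEdges NN, p.1 < p.2 := by
  rintro ⟨x, y⟩ h
  exact ((mem_pvEdges NN x y).mp h).1

lemma nodup_pvEdges (NN : Nat) : (pvEdges NN).Nodup := by
  apply List.nodup_flatMap.2
  constructor
  · intro i _
    exact (List.nodup_range').map (fun {a b} h => by injection h)
  · apply (List.pairwise_lt_range).imp
    intro a b hab p hpa hpb
    simp only [List.mem_map] at hpa hpb
    obtain ⟨j, _, rfl⟩ := hpa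
    obtain ⟨j', _, he⟩ := hpb
    cases he; omega

lemma length_pvEdges (NN : Nat) : 2 * (pvEdges NN).length = NN * (NN - 1) := by
  have key : ∀ m, m ≤ NN → 2 * (((List.range m).flatMap
      (fun i => (List.range' (i+1) (NN - (i+1))).map (fun j => (i, j)))).length)
      = m * (2 * NN - m - 1) := by
    intro m
    induction m with
    | zero => simp
    | succ m ih =>
      intro hm
      rw [List.range_succ, List.flatMap_append, List.length_append]
      have h1 := ih (by omega)
      simp only [List.flatMap_cons, List.flatMap_nil, List.append_nil, List.length_map,
        List.length_range'] at *
      obtain ⟨d, hd⟩ : ∃ d, NN = m + 1 + d := ⟨NN - (m+1), by omega⟩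
      subst hd
      rw [show m + 1 + d - (m + 1) = d by omega,
          show 2 * (m + 1 + d) - m - 1 = m + 1 + 2 * d by omega,
          show 2 * (m + 1 + d) - (m + 1) - 1 = m + 2 * d by omega] at *
      nlinarith [h1]
  refine (key NN le_rfl).trans ?_
  cases NN with
  | zero => simp
  | succ m => rw [show 2 * (m+1) - (m+1) - 1 = m by omega, show m + 1 - 1 = m by omega, Nat.mul_comm]

lemma nested_fold_eq_pvEdges (NN : Nat)
    (st0 : List (Nat × Nat) × PySem.Dict (Nat × Nat) Nat × Nat) :
    (List.range NN).foldl (fun st i =>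
      (List.range' (i+1) (NN - (i+1))).foldl
        (fun (st : List (Nat × Nat) × PySem.Dict (Nat × Nat) Nat × Nat) j =>
          (st.1 ++ [(i, j)], (st.2.1.insert (i, j) st.2.2).insert (j, i) st.2.2, st.2.2 + 1))
        st) st0
    = (pvEdges NN).foldl pvStep st0 := by
  rw [pvEdges, List.foldl_flatMap]
  apply PySem.List.foldl_congr_mem
  intro st i _
  rw [List.foldl_map]
  rfl

lemma pvStep_untouched (key : Nat × Nat) :
    ∀ (ps : List (Nat × Nat)) st0, (∀ p ∈ ps, p ≠ key ∧ (p.2, p.1) ≠ key) →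
    ((ps.foldl pvStep st0).2.1).get? key = st0.2.1.get? key := by
  intro ps
  induction ps with
  | nil => intro st0 _; rfl
  | cons p rest ih =>
    intro st0 h
    rw [List.foldl_cons, ih _ (fun q hq => h q (List.mem_cons_of_mem _ hq))]
    have h1 := h p (List.mem_cons_self)
    show ((st0.2.1.insert p st0.2.2).insert (p.2, p.1) st0.2.2).get? key = _
    rw [PySem.Dict.get?_insert_of_ne _ _ (Ne.symm h1.2), PySem.Dict.get?_insert_of_ne _ _ (Ne.symm h1.1)]

lemma pvStep_lookup (x y : Nat) (hxy : x < y) :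
    ∀ (ps : List (Nat × Nat)) st0, (∀ p ∈ ps, p.1 < p.2) → ps.Nodup → (x, y) ∈ ps →
    ((ps.foldl pvStep st0).2.1).get? (x, y) = some (st0.2.2 + ps.idxOf (x, y)) := by
  intro ps
  induction ps with
  | nil => intro _ _ _ h; cases h
  | cons p rest ih =>
    intro st0 hfs hnd hmem
    by_cases hp : p = (x, y)
    · subst hp
      rw [List.foldl_cons, pvStep_untouched _ rest _ ?_]
      · show ((st0.2.1.insert (x,y) st0.2.2).insert (y, x) st0.2.2).get? (x,y)
            = some (st0.2.2 + ((x,y) :: rest).idxOf (x,y))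
        rw [PySem.Dict.get?_insert_of_ne _ _ (by simp; omega), PySem.Dict.get?_insert_self]
        simp [List.idxOf_cons_self]
      · rintro ⟨a, b⟩ hq
        have hab := hfs _ (List.mem_cons_of_mem _ hq)
        have : (a, b) ≠ (x, y) := fun he => (List.nodup_cons.mp hnd).1 (he ▸ hq)
        refine ⟨this, fun he => ?_⟩
        cases he; omega
    · have hmem' : (x, y) ∈ rest := by
        rcases List.mem_cons.mp hmem with h | h
        · exact absurd h.symm hp
        · exact h
      rw [List.foldl_cons, ih _ (fun q hq => hfs q (List.mem_cons_of_mem _ hq))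
            (List.nodup_cons.mp hnd).2 hmem']
      rw [List.idxOf_cons_ne _ (fun he => hp he)]
      simp only [pvStep, Option.some.injEq]
      omega


lemma dict_range_getD (v : Nat → Nat) (D : PySem.Dict Nat Nat) (q : Nat) :
    ∀ (m : Nat), ((List.range m).foldl (fun d j => d.insert j (v j)) D).getD q 0
      = if q < m then v q else D.getD q 0 := by
  intro m
  induction m with
  | zero => simp
  | succ m ih =>
    rw [List.range_succ, List.foldl_append, List.foldl_cons, List.foldl_nil,
        PySem.Dict.getD_insert, ih]
    by_cases h : q = m
    · subst h; simp
    · by_cases h2 : q < m <;> simp [h, h2] <;> omega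

lemma foldl_set_length {α : Type} (g : Nat → Nat) (h : Nat → α) :
    ∀ (l : List Nat) (f : List α),
      (l.foldl (fun f j => f.set (g j) (h j)) f).length = f.length := by
  intro l
  induction l with
  | nil => intro f; rfl
  | cons a l ih => intro f; rw [List.foldl_cons, ih, List.length_set]

lemma foldl_set_range_getD (v : Nat → Nat) (off : Nat) :
    ∀ (m : Nat) (xs : List Nat) (q : Nat),
      ((List.range m).foldl (fun f j => f.set (off + j) (v j)) xs).getD q 0
      = if off ≤ q ∧ q < off + m ∧ q < xs.length then v (q - off) else xs.getD q 0 := by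
  intro m
  induction m with
  | zero => intro xs q; simp; omega
  | succ m ih =>
    intro xs q
    rw [List.range_succ, List.foldl_append, List.foldl_cons, List.foldl_nil]
    have hlen : ((List.range m).foldl (fun f j => f.set (off + j) (v j)) xs).length
        = xs.length := foldl_set_length _ _ _ _
    rw [List.getD_eq_getElem?_getD, List.getElem?_set, hlen]
    by_cases h1 : off + m = q
    · rw [if_pos h1]
      by_cases h2 : off + m < xs.length
      · rw [if_pos h2, if_pos (by omega)]
        simp [← h1]
      · rw [if_neg h2, if_neg (by omega), Option.getD_none,
            List.getD_eq_default _ _ (by omega)]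
    · rw [if_neg h1, ← List.getD_eq_getElem?_getD, ih]
      by_cases h2 : off ≤ q ∧ q < off + m ∧ q < xs.length
      · rw [if_pos h2, if_pos (by omega)]
      · rw [if_neg h2, if_neg (by omega)]

lemma foldl_or_testBit (P : (Nat × Nat) × Nat → Bool) :
    ∀ (l : List ((Nat × Nat) × Nat)) (m0 q : Nat),
      Nat.testBit (l.foldl (fun m e => if P e then m ||| 2 ^ e.2 else m) m0) q
      = (Nat.testBit m0 q || l.any (fun e => P e && e.2 == q)) := by
  intro l
  induction l with
  | nil => intro m0 q; simp
  | cons e l ih =>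
    intro m0 q
    rw [List.foldl_cons, List.any_cons]
    by_cases hP : P e
    · rw [if_pos hP, ih, Nat.testBit_or, Nat.testBit_two_pow]
      cases hq : (e.2 == q) <;> simp_all
    · rw [if_neg hP, ih]
      simp [hP]

lemma and_eq_right_iff (g m : Nat) :
    (g &&& m = m) ↔ ∀ q, Nat.testBit m q → Nat.testBit g q := by
  constructor
  · intro h q hm
    have := congrArg (fun z => Nat.testBit z q) h
    simp only [Nat.testBit_and] at this
    cases hg : Nat.testBit g q
    · rw [hg, hm] at this; simp at this
    · rfl
  · intro h
    apply Nat.eq_of_testBit_eq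
    intro q
    rw [Nat.testBit_and]
    cases hm : Nat.testBit m q
    · simp
    · simp [h q hm]

lemma getD_map_range' {α : Type} (f : Nat → α) (d : α) (m q : Nat) :
    ((List.range m).map f).getD q d = if q < m then f q else d := by
  rw [List.getD_eq_getElem?_getD, List.getElem?_map]
  by_cases h : q < m
  · simp [h]
  · rw [List.getElem?_eq_none_iff.mpr (by simp; omega)]
    simp [h]

lemma bit01 (x q : Nat) : (x >>> q) &&& 1 = if Nat.testBit x q then 1 else 0 := by
  rw [Nat.and_one_is_mod, Nat.shiftRight_eq_div_pow, Nat.testBit_eq_decide_div_mod_eq]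
  have : x / 2 ^ q % 2 = 0 ∨ x / 2 ^ q % 2 = 1 := by omega
  rcases this with h | h <;> simp [h]

lemma edge_lookup (NN x y : Nat) (hxy : x < y) (hy : y < NN) :
    ((pvEdges NN).foldl pvStep ([], PySem.Dict.empty, 0)).2.1.getD (x, y) 0
      = (pvEdges NN).idxOf (x, y) := by
  have hmem : (x, y) ∈ pvEdges NN := (mem_pvEdges NN x y).mpr ⟨hxy, hy⟩
  have := pvStep_lookup x y hxy (pvEdges NN) ([], PySem.Dict.empty, 0)
    (fst_lt_snd_pvEdges NN) (nodup_pvEdges NN) hmem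
  rw [PySem.Dict.getD_of_get?_eq_some _ 0 this]
  simp

lemma combo_check_eq (NN nn g : Nat) (full2 : List Nat)
    (edgeIdx : PySem.Dict (Nat × Nat) Nat)
    (hElen : (pvEdges NN).length ≤ nn)
    (hfull : ∀ q, q < nn → full2.getD q 0 = if Nat.testBit g q then 1 else 0)
    (hidx : ∀ x y : Nat, x < y → y < NN → edgeIdx.getD (x, y) 0 = (pvEdges NN).idxOf (x, y))
    (c : List Nat) (hsub : c.Sublist (List.range NN)) :
    ((List.range c.length).all fun a => (List.range' (a+1) (c.length - (a+1))).all fun b =>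
        full2.getD (edgeIdx.getD (c.getD a 0, c.getD b 0) 0) 0 != 0)
    = (g &&& ((pvEdges NN).zipIdx.foldl (fun m e =>
          if (PySem.Set.ofList c).contains e.1.1 && (PySem.Set.ofList c).contains e.1.2
          then m ||| 2 ^ e.2 else m) 0) ==
       ((pvEdges NN).zipIdx.foldl (fun m e =>
          if (PySem.Set.ofList c).contains e.1.1 && (PySem.Set.ofList c).contains e.1.2
          then m ||| 2 ^ e.2 else m) 0)) := by
  have hpw : c.Pairwise (· < ·) := List.Pairwise.sublist hsub List.pairwise_lt_range
  have hmemN : ∀ z ∈ c, z < NN := fun z hz => List.mem_range.mp (hsub.subset hz)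
  have hpos : ∀ (pa pb : Nat), pa < c.length → pb < c.length → pa < pb →
      c.getD pa 0 < c.getD pb 0 := by
    intro pa pb hpa hpb hab
    rw [List.getD_eq_getElem c 0 hpa, List.getD_eq_getElem c 0 hpb]
    exact List.pairwise_iff_getElem.mp hpw pa pb hpa hpb hab
  apply Bool.coe_iff_coe.mp
  rw [beq_iff_eq, and_eq_right_iff]
  simp only [List.all_eq_true, List.mem_range, List.mem_range'_1, bne_iff_ne, ne_eq]
  constructor
  · -- A-style check implies the mask check
    intro hA q hq
    rw [foldl_or_testBit] at hq
    simp only [Nat.zero_testBit, Bool.false_or, List.any_eq_true, Bool.and_eq_true,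
      beq_iff_eq] at hq
    obtain ⟨e, hein, ⟨hPi, hPj⟩, heq⟩ := hq
    rw [List.mem_zipIdx_iff_getElem?] at hein
    have hilt : e.2 < (pvEdges NN).length := by
      by_contra h
      rw [List.getElem?_eq_none_iff.mpr (by omega)] at hein
      cases hein
    have hget : (pvEdges NN)[e.2] = e.1 := by
      rw [List.getElem?_eq_getElem hilt] at hein
      exact (Option.some.injEq .. ▸ hein)
    have hic : e.1.1 ∈ c := by
      rw [PySem.Set.contains_iff, PySem.Set.mem_ofList] at hPi; exact hPi
    have hjc : e.1.2 ∈ c := by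
      rw [PySem.Set.contains_iff, PySem.Set.mem_ofList] at hPj; exact hPj
    have hij : e.1.1 < e.1.2 := fst_lt_snd_pvEdges NN e.1 (hget ▸ List.getElem_mem hilt)
    obtain ⟨pa, hpa, hca⟩ := List.mem_iff_getElem.mp hic
    obtain ⟨pb, hpb, hcb⟩ := List.mem_iff_getElem.mp hjc
    have hca' : c.getD pa 0 = e.1.1 := by rw [List.getD_eq_getElem c 0 hpa]; exact hca
    have hcb' : c.getD pb 0 = e.1.2 := by rw [List.getD_eq_getElem c 0 hpb]; exact hcb
    have hab : pa < pb := by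
      rcases Nat.lt_trichotomy pa pb with h | h | h
      · exact h
      · exfalso; subst h; omega
      · exfalso
        have h5 := hpos pb pa hpb hpa h
        omega
    have := hA pa (by omega) pb ⟨by omega, by omega⟩
    rw [hca', hcb', hidx e.1.1 e.1.2 hij (hmemN _ hjc)] at this
    -- idxOf of e.1 equals e.2 by Nodup
    have hidxof : (pvEdges NN).idxOf (e.1.1, e.1.2) = e.2 := by
      have hm : (e.1.1, e.1.2) ∈ pvEdges NN := by
        rw [show (e.1.1, e.1.2) = e.1 from rfl, ← hget]; exact List.getElem_mem hilt
      have h1 := List.idxOf_lt_length_of_mem hm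
      have h2 : (pvEdges NN)[(pvEdges NN).idxOf (e.1.1, e.1.2)]'h1 = (e.1.1, e.1.2) :=
        List.getElem_idxOf h1
      exact (List.Nodup.getElem_inj_iff (nodup_pvEdges NN) (hi := h1) (hj := hilt)).mp
        (by rw [h2, hget])
    rw [hidxof] at this
    have hq2 : e.2 < nn := by omega
    rw [hfull e.2 hq2] at this
    subst heq
    cases hg : Nat.testBit g e.2
    · rw [hg] at this; simp at this
    · rfl
  · -- mask check implies the A-style check
    intro hB a ha b hb
    have hblt : b < c.length := by omega
    have halt : a < b := by omega
    have hiac : c.getD a 0 ∈ c := by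
      rw [List.getD_eq_getElem c 0 ha]; exact List.getElem_mem ha
    have hibc : c.getD b 0 ∈ c := by
      rw [List.getD_eq_getElem c 0 hblt]; exact List.getElem_mem hblt
    have hij : c.getD a 0 < c.getD b 0 := hpos a b ha hblt halt
    have hjN : c.getD b 0 < NN := hmemN _ hibc
    have hm : (c.getD a 0, c.getD b 0) ∈ pvEdges NN := (mem_pvEdges NN _ _).mpr ⟨hij, hjN⟩
    have h1 := List.idxOf_lt_length_of_mem hm
    have h2 := List.getElem_idxOf h1
    have htb : Nat.testBit g ((pvEdges NN).idxOf (c.getD a 0, c.getD b 0)) = true := by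
      apply hB
      rw [foldl_or_testBit]
      simp only [Nat.zero_testBit, Bool.false_or, List.any_eq_true, Bool.and_eq_true,
        beq_iff_eq]
      refine ⟨((c.getD a 0, c.getD b 0), (pvEdges NN).idxOf (c.getD a 0, c.getD b 0)),
        ?_, ⟨?_, ?_⟩, rfl⟩
      · rw [List.mem_zipIdx_iff_getElem?, List.getElem?_eq_getElem h1, h2]
      · rw [PySem.Set.contains_iff, PySem.Set.mem_ofList]; exact hiac
      · rw [PySem.Set.contains_iff, PySem.Set.mem_ofList]; exact hibc
    rw [hidx _ _ hij hjN, hfull _ (by omega), htb]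
    simp

lemma getD_range_lt (m q : Nat) (h : q < m) : (List.range m).getD q 0 = q := by
  rw [List.getD_eq_getElem _ _ (by simpa using h)]
  simp

lemma getD_range'_lt (s m q : Nat) (h : q < m) : (List.range' s m).getD q 0 = s + q := by
  rw [List.getD_eq_getElem _ _ (by simpa using h)]
  simp

lemma getD_replicate_zero (nn q : Nat) : (List.replicate nn (0 : Nat)).getD q 0 = 0 := by
  by_cases h : q < nn
  · rw [List.getD_eq_getElem _ _ (by simpa using h), List.getElem_replicate]
  · rw [List.getD_eq_default _ _ (by simpa using h)]

lemma entry_eq (NN nn tt rr kk pb cb : Nat)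
    (htr : tt + rr = nn) (hE : (pvEdges NN).length ≤ nn)
    (hpb : pb < 2 ^ tt) (hcb : cb < 2 ^ rr) :
    (if (PySem.List.combinations (List.range NN) kk).any (fun combo =>
          (List.range combo.length).all fun a =>
            (List.range' (a + 1) (combo.length - (a + 1))).all fun b =>
              ((List.range rr).foldl
                  (fun f j => f.set ((List.range' tt rr).getD j 0) ((cb >>> j) &&& 1))
                  ((List.range tt).foldl
                    (fun f j => f.set ((List.range tt).getD j 0)
                      (((List.range tt).foldl
                          (fun d j => d.insert ((List.range tt).getD j 0) ((pb >>> j) &&& 1))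
                          PySem.Dict.empty).getD ((List.range tt).getD j 0) 0))
                    (List.replicate nn 0))).getD
                ((((pvEdges NN).foldl pvStep ([], PySem.Dict.empty, 0)).2.1).getD
                  (combo.getD a 0, combo.getD b 0) 0) 0 != 0)
      then (1 : Int) else 0)
    = ((List.range (2 ^ nn)).map (fun g =>
        if ((PySem.List.combinations (List.range NN) kk).map (fun combo =>
              (pvEdges NN).zipIdx.foldl (fun m e =>
                if (PySem.Set.ofList combo).contains e.1.1 && (PySem.Set.ofList combo).contains e.1.2
                then m ||| 2 ^ e.2 else m) 0)).any (fun m => g &&& m == m)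
        then (1 : Int) else 0)).getD (pb ||| (cb <<< tt)) 0 := by
  have hsh : cb <<< tt = cb * 2 ^ tt := Nat.shiftLeft_eq cb tt
  have hg : pb ||| (cb <<< tt) < 2 ^ nn := by
    apply Nat.or_lt_two_pow
    · exact lt_of_lt_of_le hpb (Nat.pow_le_pow_right (by norm_num) (by omega))
    · rw [hsh, ← htr, Nat.pow_add, Nat.mul_comm (2 ^ tt)]
      exact Nat.mul_lt_mul_of_lt_of_le hcb (le_refl _) (by positivity)
  rw [getD_map_range' _ _ _ _, if_pos hg, List.any_map]
  -- canonical form of the full edge vector built by A's two write loops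
  have hpart : ∀ (j : Nat), j < tt →
      ((List.range tt).foldl
        (fun d j => d.insert ((List.range tt).getD j 0) ((pb >>> j) &&& 1))
        PySem.Dict.empty).getD j 0 = (pb >>> j) &&& 1 := by
    intro j hj
    have hcong : (List.range tt).foldl
        (fun d j => d.insert ((List.range tt).getD j 0) ((pb >>> j) &&& 1))
        PySem.Dict.empty
        = (List.range tt).foldl (fun d j => d.insert j ((pb >>> j) &&& 1)) PySem.Dict.empty :=
      PySem.List.foldl_congr_mem _ _ _ _
        (fun acc x hx => by rw [getD_range_lt tt x (List.mem_range.mp hx)])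
    rw [hcong, dict_range_getD, if_pos hj]
  have hfull1 : (List.range tt).foldl
      (fun f j => f.set ((List.range tt).getD j 0)
        (((List.range tt).foldl
            (fun d j => d.insert ((List.range tt).getD j 0) ((pb >>> j) &&& 1))
            PySem.Dict.empty).getD ((List.range tt).getD j 0) 0))
      (List.replicate nn 0)
      = (List.range tt).foldl (fun f j => f.set (0 + j) ((pb >>> j) &&& 1))
          (List.replicate nn 0) :=
    PySem.List.foldl_congr_mem _ _ _ _ (fun acc x hx => by
      rw [getD_range_lt tt x (List.mem_range.mp hx), hpart x (List.mem_range.mp hx),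
          Nat.zero_add])
  have hfull2 : (List.range rr).foldl
      (fun f j => f.set ((List.range' tt rr).getD j 0) ((cb >>> j) &&& 1))
      ((List.range tt).foldl (fun f j => f.set (0 + j) ((pb >>> j) &&& 1))
        (List.replicate nn 0))
      = (List.range rr).foldl (fun f j => f.set (tt + j) ((cb >>> j) &&& 1))
          ((List.range tt).foldl (fun f j => f.set (0 + j) ((pb >>> j) &&& 1))
            (List.replicate nn 0)) :=
    PySem.List.foldl_congr_mem _ _ _ _ (fun acc x hx => by
      rw [getD_range'_lt tt rr x (List.mem_range.mp hx)])
  have hlen1 : ((List.range tt).foldl (fun f j => f.set (0 + j) ((pb >>> j) &&& 1))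
      (List.replicate nn 0)).length = nn := by
    rw [foldl_set_length, List.length_replicate]
  have hfull : ∀ q, q < nn →
      ((List.range rr).foldl (fun f j => f.set (tt + j) ((cb >>> j) &&& 1))
        ((List.range tt).foldl (fun f j => f.set (0 + j) ((pb >>> j) &&& 1))
          (List.replicate nn 0))).getD q 0
      = if Nat.testBit (pb ||| (cb <<< tt)) q then 1 else 0 := by
    intro q hq
    rw [foldl_set_range_getD, hlen1, foldl_set_range_getD, List.length_replicate,
        getD_replicate_zero, Nat.testBit_or, Nat.testBit_shiftLeft]
    by_cases hqt : q < tt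
    · rw [if_neg (show ¬(tt ≤ q ∧ q < tt + rr ∧ q < nn) by omega),
          if_pos (show 0 ≤ q ∧ q < 0 + tt ∧ q < nn by omega), Nat.sub_zero, bit01,
          show decide (q ≥ tt) = false by simp; omega]
      simp
    · rw [if_pos (show tt ≤ q ∧ q < tt + rr ∧ q < nn by omega), bit01,
          show Nat.testBit pb q = false from Nat.testBit_lt_two_pow
            (lt_of_lt_of_le hpb (Nat.pow_le_pow_right (by norm_num) (by omega))),
          show decide (q ≥ tt) = true by simp; omega]
      simp
  rw [hfull1, hfull2]
  refine congrArg (fun b : Bool => if b then (1 : Int) else 0) ?_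
  apply PySem.List.any_congr_mem
  intro c hc
  exact combo_check_eq NN nn (pb ||| (cb <<< tt)) _ _ hE hfull
    (fun x y hxy hy => edge_lookup NN x y hxy hy) c
    (PySem.List.sublist_of_mem_combinations hc)

-- ===== VERDICT (by name: the statement is the Claim_ definition above) =====
theorem count_nonequivalent_partial_graphs_spec : Claim_equal_count_nonequivalent_partial_graphs := by
  intro N k t_edges hdom hpre
  unfold Spec_count_nonequivalent_partial_graphs
  unfold count_nonequivalent_partial_graphs count_nonequivalent_partial_graphs_alt
  have hmin : (if PySem.Int.floordiv (N * (N - 1)) 2 < t_edges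
      then PySem.Int.floordiv (N * (N - 1)) 2 else t_edges)
      = min t_edges (PySem.Int.floordiv (N * (N - 1)) 2) := by
    rw [min_def]; split_ifs <;> omega
  simp only [hmin]
  set n := PySem.Int.floordiv (N * (N - 1)) 2 with hn
  set t := min t_edges n with ht2
  have hn0 : 0 ≤ n := by
    rw [hn, PySem.Int.floordiv_eq_ediv_of_pos (by norm_num : (0:Int) < 2)]
    apply Int.ediv_nonneg _ (by norm_num)
    by_cases h : 1 ≤ N
    · exact mul_nonneg (by omega) (by omega)
    · exact Int.mul_nonneg_of_nonpos_of_nonpos (by omega) (by omega)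
  by_cases hg : (18:Int) < n - t
  · rw [if_pos (show (18:Int) < ((n - t).toNat : Int) by omega), if_pos hg]
  · rw [if_neg (show ¬ (18:Int) < ((n - t).toNat : Int) by omega), if_neg hg]
    obtain ⟨hte, hk⟩ : 0 ≤ t_edges ∧ 0 ≤ k := by
      rcases hpre with h | h
      · exact absurd (show (18:Int) < n - t by rw [ht2]; exact h) hg
      · exact h
    have ht0 : 0 ≤ t := le_min hte hn0
    have htn : t ≤ n := min_le_right _ _
    have htr : t.toNat + (n - t).toNat = n.toNat := by omega
    have hE : (pvEdges N.toNat).length ≤ n.toNat := by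
      by_cases hN : 0 ≤ N
      · have h2l := length_pvEdges N.toNat
        have hNc : (N.toNat : Int) = N := Int.toNat_of_nonneg hN
        have hcast : N * (N - 1) = ((N.toNat * (N.toNat - 1) : Nat) : Int) := by
          rcases Nat.eq_zero_or_pos N.toNat with h0 | h1
          · have hN0 : N = 0 := by omega
            subst hN0; simp
          · push_cast [Nat.cast_sub (by omega : 1 ≤ N.toNat)]
            rw [hNc]
        have hneq : n = ((N.toNat * (N.toNat - 1) / 2 : Nat) : Int) := by
          rw [hn, hcast]
          exact_mod_cast PySem.Int.floordiv_natCast _ 2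
        omega
      · have h0 : N.toNat = 0 := by omega
        rw [h0, show pvEdges 0 = [] from rfl]
        simp
    rw [nested_fold_eq_pvEdges,
        show (List.range N.toNat).flatMap
            (fun i => (List.range' (i+1) (N.toNat - (i+1))).map (fun j => (i, j)))
          = pvEdges N.toNat from rfl]
    simp only [Nat.one_shiftLeft]
    refine congrArg _ ?_
    apply PySem.List.foldl_congr_mem
    intro acc pb hpb
    refine congrArg (PySem.Set.add acc) ?_
    apply List.map_congr_left
    intro cb hcb
    exact entry_eq N.toNat n.toNat t.toNat (n - t).toNat k.toNat pb cb htr hE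
      (List.mem_range.mp hpb) (List.mem_range.mp hcb)
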